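-- pv_equiv track=rewrite | github.com/PCBZ/AlgorithmPractise | TikTok_oa/TikTokViralChallenge.py | countViralSubstrings
-- ===== SOURCE A (Python) =====
-- def getNonViralCount(video: str, engagementArray: [int]) -> int:
--     total_count = 0
--     for ch in video:
--         if engagementArray[ord(ch) - ord('a')] == 0:
--             total_count += 1
--     return total_count
--
-- def countViralSubstrings(video: str, k: int, engagementArray: [int]) -> int:
--     n = len(video)
--     total_non_viral = 0
--     for start in range(len(video)):
--         for end in range(start+1, len(video)+1):
--             sub_video = video[start:end]
--             if getNonViralCount(sub_video, engagementArray) <= k: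
--                 total_non_viral += 1
--     return total_non_viral
-- ===== SOURCE B (Python) =====
-- def countViralSubstrings(video: str, k: int, engagementArray: [int]) -> int:
--     n = len(video)
--     bad = [1 if engagementArray[ord(ch) - ord('a')] == 0 else 0 for ch in video]
--     total = 0
--     left = 0
--     cnt = 0
--     for right in range(n):
--         cnt += bad[right]
--         while cnt > k and left <= right:
--             cnt -= bad[left]
--             left += 1
--         total += right - left + 1
--     return total
-- ===== Notes on version B (the rewrite author's own statement) =====
-- stated objective: faster
-- what changed: Replaced the triple loop (enumerate every substring and re-count its zero-engagement characters) by a two-pointer sliding window over precomputed bad-character flags that counts, for each right end, all valid left ends at once.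
import Mathlib
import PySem

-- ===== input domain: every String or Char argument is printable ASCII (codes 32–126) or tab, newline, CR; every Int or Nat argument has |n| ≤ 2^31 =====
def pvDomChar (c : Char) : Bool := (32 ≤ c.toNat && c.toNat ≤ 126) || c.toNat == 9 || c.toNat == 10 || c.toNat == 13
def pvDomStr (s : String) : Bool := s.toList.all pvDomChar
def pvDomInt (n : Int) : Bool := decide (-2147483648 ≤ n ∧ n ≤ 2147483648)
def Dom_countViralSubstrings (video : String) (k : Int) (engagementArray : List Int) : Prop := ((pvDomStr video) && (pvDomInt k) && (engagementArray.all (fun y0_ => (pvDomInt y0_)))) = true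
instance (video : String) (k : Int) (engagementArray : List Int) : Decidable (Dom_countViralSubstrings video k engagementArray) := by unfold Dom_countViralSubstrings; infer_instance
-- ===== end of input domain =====

-- B replaces A's triple loop (every substring re-counted from scratch) by a two-pointer sliding
-- window over precomputed 0/1 bad-character flags (objective: faster, O(n) instead of O(n^3)).

-- ===== PORT A =====
-- A's helper: counts characters whose engagement entry is 0; Python indexes with
-- ord(ch)-97, which may be negative (wraps) or out of range (raises: excluded by Pre_).
def getNonViralCount (video : List Char) (engagementArray : List Int) : Int :=
  video.foldl (fun total_count ch =>
    if PySem.List.pyGet? engagementArray ((ch.toNat : Int) - 97) = some 0 then total_count + 1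
    else total_count) 0

def countViralSubstrings (video : String) (k : Int) (engagementArray : List Int) : Int :=
  let chars := video.toList
  let n : Int := chars.length
  (PySem.List.pyRange 0 n 1).foldl (fun total start =>
    (PySem.List.pyRange (start + 1) (n + 1) 1).foldl (fun total end_ =>
      if getNonViralCount (PySem.List.slice chars (some start) (some end_)) engagementArray ≤ k
      then total + 1 else total) total) 0

-- ===== PORT B =====
-- the list comprehension building the 0/1 bad flags
def cvsBadFlags (chars : List Char) (engagementArray : List Int) : List Int :=
  chars.map (fun ch =>
    if PySem.List.pyGet? engagementArray ((ch.toNat : Int) - 97) = some 0 then (1 : Int) else 0)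

-- the inner 'while cnt > k and left <= right:' loop; bad[left] is always in range when
-- it is read (left ≤ right < len(bad)), so getD is exact there
def cvsShrink (bad : List Int) (k : Int) (right left : Nat) (cnt : Int) : Nat × Int :=
  if h : k < cnt ∧ left ≤ right then
    cvsShrink bad k right (left + 1) (cnt - bad.getD left 0)
  else (left, cnt)
termination_by right + 1 - left
decreasing_by omega

def countViralSubstrings_alt (video : String) (k : Int) (engagementArray : List Int) : Int :=
  let chars := video.toList
  let bad := cvsBadFlags chars engagementArray
  let st := (List.range chars.length).foldl (fun (st : Int × Nat × Int) right =>
    let cnt := st.2.2 + bad.getD right 0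
    let p := cvsShrink bad k right st.2.1 cnt
    (st.1 + ((right : Int) - (p.1 : Int) + 1), p.1, p.2)) (0, 0, 0)
  st.1

-- ===== PRECONDITION & SPEC =====
-- Pre_ excludes exactly the inputs on which Python A raises IndexError: a non-empty video
-- containing a character whose index ord(ch)-97 falls outside [-len, len) of engagementArray.
def Pre_countViralSubstrings (video : String) (k : Int) (engagementArray : List Int) : Prop :=
  video.toList.all (fun c =>
    decide (PySem.Raise.InRange engagementArray.length ((c.toNat : Int) - 97))) = true
instance (video : String) (k : Int) (engagementArray : List Int) : Decidable (Pre_countViralSubstrings video k engagementArray) := by unfold Pre_countViralSubstrings; infer_instance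

def pvWitness_countViralSubstrings : String × Int × List Int := ("ab", 1, [0, 1])

def Spec_countViralSubstrings (video : String) (k : Int) (engagementArray : List Int) (out : Int) : Prop := out = countViralSubstrings_alt video k engagementArray
instance (video : String) (k : Int) (engagementArray : List Int) (out : Int) : Decidable (Spec_countViralSubstrings video k engagementArray out) := by unfold Spec_countViralSubstrings; infer_instance

-- ===== CLAIM (what is proved, stated in full; the proofs are below) =====
def Claim_equal_countViralSubstrings : Prop := ∀ (video : String) (k : Int) (engagementArray : List Int), Dom_countViralSubstrings video k engagementArray → Pre_countViralSubstrings video k engagementArray → Spec_countViralSubstrings video k engagementArray (countViralSubstrings video k engagementArray)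

-- ===== LEMMAS AND PROOFS =====
def cvsPref (bad : List Int) (i : Nat) : Int := (bad.take i).sum

def cvsInd (bad : List Int) (k : Int) (s e : Nat) : Int :=
  if cvsPref bad e - cvsPref bad s ≤ k then 1 else 0

theorem cvsPref_mono (bad : List Int) (h01 : ∀ x ∈ bad, x = 0 ∨ x = 1) {i j : Nat} (hij : i ≤ j) :
    cvsPref bad i ≤ cvsPref bad j := by
  unfold cvsPref
  rw [show j = i + (j - i) by omega, List.take_add, List.sum_append]
  have : 0 ≤ (List.take (j - i) (List.drop i bad)).sum := by
    apply List.sum_nonneg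
    intro x hx
    have : x ∈ bad := List.mem_of_mem_drop (List.mem_of_mem_take hx)
    rcases h01 x this with rfl | rfl <;> norm_num
  omega

theorem cvsPref_succ (bad : List Int) {i : Nat} (hi : i < bad.length) :
    cvsPref bad (i + 1) = cvsPref bad i + bad.getD i 0 := by
  unfold cvsPref
  rw [List.take_succ, List.sum_append, List.getElem?_eq_getElem hi, List.getD_eq_getElem bad 0 hi]
  simp

theorem cvsSum_slice (bad : List Int) {s e : Nat} (hse : s ≤ e) :
    ((bad.drop s).take (e - s)).sum = cvsPref bad e - cvsPref bad s := by
  unfold cvsPref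
  conv_rhs => rw [show e = s + (e - s) by omega, List.take_add, List.sum_append]
  ring

theorem gnc_eq_sum (sub : List Char) (arr : List Int) :
    getNonViralCount sub arr = (cvsBadFlags sub arr).sum := by
  unfold getNonViralCount cvsBadFlags
  rw [PySem.List.foldl_ite_add_one (fun ch => PySem.List.pyGet? arr ((ch.toNat : Int) - 97) = some 0) sub 0,
]
  have h := PySem.List.sum_map_ite_one_zero (fun ch => decide (PySem.List.pyGet? arr ((ch.toNat : Int) - 97) = some 0)) sub
  simp only [decide_eq_true_eq] at h
  rw [h]
  simp

theorem cvsRangeSum (f : Nat → Int) (n : Nat) :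
    ((List.range n).map f).sum = ∑ i ∈ Finset.range n, f i := by
  induction n with
  | zero => simp
  | succ n ih => rw [List.range_succ, List.map_append, List.sum_append, Finset.sum_range_succ, ih]; simp

theorem cvsCountP_toSum {α : Type} (p : α → Prop) [DecidablePred p] (l : List α) :
    ((l.countP (fun x => decide (p x)) : Int)) = (l.map (fun x => if p x then (1:Int) else 0)).sum := by
  have h := PySem.List.sum_map_ite_one_zero (fun x => decide (p x)) l
  simp only [decide_eq_true_eq] at h
  rw [h]

theorem A_closed (video : String) (k : Int) (arr : List Int) :
    countViralSubstrings video k arr =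
      ∑ s ∈ Finset.range video.toList.length,
        ∑ e ∈ Finset.Ico (s + 1) (video.toList.length + 1),
          cvsInd (cvsBadFlags video.toList arr) k s e := by
  unfold countViralSubstrings
  set chars := video.toList with hchars
  simp only [PySem.List.foldl_ite_add_one, PySem.List.foldl_add, zero_add]
  rw [PySem.List.pyRange_zero_natCast, List.map_map, cvsRangeSum]
  apply Finset.sum_congr rfl
  intro s hs
  rw [Finset.mem_range] at hs
  rw [Finset.sum_Ico_eq_sum_range]
  simp only [Function.comp, cvsCountP_toSum]
  have hrange : PySem.List.pyRange ((s : Int) + 1) ((chars.length : Int) + 1) =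
      List.map (fun j : Nat => (s : Int) + 1 + (j : Int)) (List.range (chars.length - s)) := by
    rw [PySem.List.pyRange_one]
    have : (((chars.length : Int) + 1) - ((s : Int) + 1)).toNat = chars.length - s := by omega
    rw [this]
  rw [hrange, List.map_map, cvsRangeSum]
  have hns : chars.length + 1 - (s + 1) = chars.length - s := by omega
  rw [hns]
  apply Finset.sum_congr rfl
  intro j hj
  rw [Finset.mem_range] at hj
  simp only [Function.comp]
  have hcast : (s : Int) + 1 + (j : Int) = ((s + 1 + j : Nat) : Int) := by push_cast; ring
  simp only [hcast, PySem.List.slice_natCast, gnc_eq_sum]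
  have hsl := cvsSum_slice (cvsBadFlags chars arr) (s := s) (e := s + 1 + j) (by omega)
  rw [show (cvsBadFlags (List.take (s + 1 + j - s) (List.drop s chars)) arr) =
      List.take (s + 1 + j - s) (List.drop s (cvsBadFlags chars arr)) by
    unfold cvsBadFlags; rw [← List.map_drop, ← List.map_take]]
  simp only [hsl, cvsInd]

theorem cvsBadFlags_mem (chars : List Char) (arr : List Int) :
    ∀ x ∈ cvsBadFlags chars arr, x = 0 ∨ x = 1 := by
  intro x hx
  simp only [cvsBadFlags, List.mem_map] at hx
  obtain ⟨c, -, rfl⟩ := hx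
  split_ifs <;> simp

theorem cvsSumIndicator (m c : Nat) (hcm : c ≤ m) :
    (∑ s ∈ Finset.range m, if c ≤ s then (1 : Int) else 0) = (m : Int) - (c : Int) := by
  rw [Finset.sum_boole]
  have : Finset.filter (fun s => c ≤ s) (Finset.range m) = Finset.Ico c m := by
    apply Finset.ext
    intro x
    simp [Finset.mem_filter, Finset.mem_range, Finset.mem_Ico, and_comm]
  rw [this, Nat.card_Ico]
  omega

theorem cvsContribution (bad : List Int) (k : Int) (n : Nat) (hn : n < bad.length)
    (h01 : ∀ x ∈ bad, x = 0 ∨ x = 1) (p : Nat × Int)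
    (hp1 : p.1 ≤ n + 1)
    (hp2 : p.2 = cvsPref bad (n + 1) - cvsPref bad p.1)
    (hp3 : ∀ l < p.1, k < cvsPref bad (n + 1) - cvsPref bad l)
    (hp4 : p.2 ≤ k ∨ p.1 = n + 1) :
    (n : Int) - (p.1 : Int) + 1 = ∑ s ∈ Finset.range (n + 1), cvsInd bad k s (n + 1) := by
  have key : ∀ s ∈ Finset.range (n + 1), cvsInd bad k s (n + 1) = if p.1 ≤ s then (1 : Int) else 0 := by
    intro s hs
    rw [Finset.mem_range] at hs
    unfold cvsInd
    by_cases hps : p.1 ≤ s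
    · have hmono := cvsPref_mono bad h01 hps
      have hp2k : p.2 ≤ k := by
        rcases hp4 with h | h
        · exact h
        · omega
      rw [if_pos hps, if_pos (by omega)]
    · rw [if_neg hps, if_neg (by push_neg at hps; have := hp3 s (by omega); omega)]
  rw [Finset.sum_congr rfl key, cvsSumIndicator (n + 1) p.1 hp1]
  omega

theorem cvsShrink_spec (bad : List Int) (k : Int) (right : Nat) (hr : right < bad.length) :
    ∀ left cnt, left ≤ right + 1 → cnt = cvsPref bad (right + 1) - cvsPref bad left →
      (∀ l < left, k < cvsPref bad (right + 1) - cvsPref bad l) →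
      (cvsShrink bad k right left cnt).1 ≤ right + 1 ∧
      (cvsShrink bad k right left cnt).2 =
        cvsPref bad (right + 1) - cvsPref bad (cvsShrink bad k right left cnt).1 ∧
      (∀ l < (cvsShrink bad k right left cnt).1, k < cvsPref bad (right + 1) - cvsPref bad l) ∧
      ((cvsShrink bad k right left cnt).2 ≤ k ∨ (cvsShrink bad k right left cnt).1 = right + 1) := by
  suffices H : ∀ fuel left cnt, right + 1 - left ≤ fuel → left ≤ right + 1 →
      cnt = cvsPref bad (right + 1) - cvsPref bad left →
      (∀ l < left, k < cvsPref bad (right + 1) - cvsPref bad l) →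
      (cvsShrink bad k right left cnt).1 ≤ right + 1 ∧
      (cvsShrink bad k right left cnt).2 =
        cvsPref bad (right + 1) - cvsPref bad (cvsShrink bad k right left cnt).1 ∧
      (∀ l < (cvsShrink bad k right left cnt).1, k < cvsPref bad (right + 1) - cvsPref bad l) ∧
      ((cvsShrink bad k right left cnt).2 ≤ k ∨ (cvsShrink bad k right left cnt).1 = right + 1) by
    intro left cnt h1 h2 h3
    exact H (right + 1) left cnt (by omega) h1 h2 h3
  intro fuel
  induction fuel with
  | zero =>
    intro left cnt hfuel hle hcnt hmin
    have hleft : left = right + 1 := by omega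
    rw [cvsShrink]
    have hcond : ¬ (k < cnt ∧ left ≤ right) := by omega
    simp only [hcond, dif_neg, not_false_iff]
    exact ⟨hle, hcnt, hmin, Or.inr hleft⟩
  | succ fuel ih =>
    intro left cnt hfuel hle hcnt hmin
    rw [cvsShrink]
    by_cases hcond : k < cnt ∧ left ≤ right
    · simp only [hcond, dif_pos]
      apply ih (left + 1) (cnt - bad.getD left 0) (by omega) (by omega)
      · have := cvsPref_succ bad (i := left) (by omega)
        omega
      · intro l hl
        by_cases hll : l < left
        · exact hmin l hll
        · have : l = left := by omega
          subst this
          omega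
    · simp only [hcond, dif_neg, not_false_iff]
      refine ⟨hle, hcnt, hmin, ?_⟩
      omega

theorem B_closed (video : String) (k : Int) (arr : List Int) :
    countViralSubstrings_alt video k arr =
      ∑ e ∈ Finset.range (video.toList.length + 1),
        ∑ s ∈ Finset.range e,
          cvsInd (cvsBadFlags video.toList arr) k s e := by
  unfold countViralSubstrings_alt
  dsimp only
  set chars := video.toList with hchars
  set bad := cvsBadFlags chars arr with hbad
  have hlen : bad.length = chars.length := by rw [hbad]; unfold cvsBadFlags; simp
  have h01 := cvsBadFlags_mem chars arr
  rw [← hbad] at h01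
  suffices H : ∀ n ≤ chars.length,
      (let st := (List.range n).foldl (fun (st : Int × Nat × Int) right =>
        let cnt := st.2.2 + bad.getD right 0
        let p := cvsShrink bad k right st.2.1 cnt
        (st.1 + ((right : Int) - (p.1 : Int) + 1), p.1, p.2)) (0, 0, 0)
       st.2.1 ≤ n ∧ st.2.2 = cvsPref bad n - cvsPref bad st.2.1 ∧
       (∀ l < st.2.1, k < cvsPref bad n - cvsPref bad l) ∧
       st.1 = ∑ e ∈ Finset.range (n + 1), ∑ s ∈ Finset.range e, cvsInd bad k s e) by
    have h := H chars.length le_rfl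
    exact h.2.2.2
  intro n hn
  induction n with
  | zero => simp [cvsPref]
  | succ n ihn =>
    have hn' : n ≤ chars.length := by omega
    have ih := ihn hn'
    simp only at ih ⊢
    rw [List.range_succ, List.foldl_append, List.foldl_cons, List.foldl_nil]
    set st := (List.range n).foldl (fun (st : Int × Nat × Int) right =>
      let cnt := st.2.2 + bad.getD right 0
      let p := cvsShrink bad k right st.2.1 cnt
      (st.1 + ((right : Int) - (p.1 : Int) + 1), p.1, p.2)) (0, 0, 0) with hst
    obtain ⟨ih1, ih2, ih3, ih4⟩ := ih
    have hnlen : n < bad.length := by omega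
    have hcnt : st.2.2 + bad.getD n 0 = cvsPref bad (n + 1) - cvsPref bad st.2.1 := by
      have := cvsPref_succ bad hnlen
      omega
    have hp := cvsShrink_spec bad k n hnlen st.2.1 (st.2.2 + bad.getD n 0) (by omega) hcnt
      (by intro l hl; have h2 := cvsPref_succ bad hnlen
          have h3 := ih3 l hl
          have h4 : 0 ≤ bad.getD n 0 := by
            rw [List.getD_eq_getElem bad 0 hnlen]
            rcases h01 _ (List.getElem_mem hnlen) with h | h <;> omega
          omega)
    obtain ⟨hp1, hp2, hp3, hp4⟩ := hp
    refine ⟨hp1, hp2, hp3, ?_⟩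
    rw [Finset.sum_range_succ (n := n + 1), ← ih4,
        cvsContribution bad k n hnlen h01 _ hp1 hp2 hp3 hp4]

theorem cvsSwap (f : Nat → Nat → Int) (n : Nat) :
    ∑ s ∈ Finset.range n, ∑ e ∈ Finset.Ico (s + 1) (n + 1), f s e =
      ∑ e ∈ Finset.range (n + 1), ∑ s ∈ Finset.range e, f s e := by
  have h := Finset.sum_Ico_Ico_comm' 0 (n + 1) f
  simp only [Finset.range_eq_Ico]
  rw [← h, Finset.sum_Ico_succ_top (by omega)]
  simp

-- ===== VERDICT (by name: the statement is the Claim_ definition above) =====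
theorem countViralSubstrings_spec : Claim_equal_countViralSubstrings := by
  intro video k engagementArray _ _
  unfold Spec_countViralSubstrings
  rw [A_closed, B_closed, cvsSwap]
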